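-- pv_equiv track=rewrite | github.com/johndpope/ltx2-castlehill | packages/ltx-core/src/ltx_core/model/transformer/clifford_attention.py | compute_temporal_shifts
-- ===== SOURCE A (Python) =====
-- def compute_temporal_shifts(num_shifts: int) -> list[int]:
--     """Non-zero bidirectional integer shifts for temporal (cross-frame) rolling.
--
--     Generates shifts like [1, -1, 2, -2, ...] (excludes 0 since spatial shifts
--     already cover same-frame self-attention).
--
--     Args:
--         num_shifts: Total number of temporal shifts (should be even for symmetry)
--
--     Returns:
--         List of non-zero integer shifts
--     """
--     if num_shifts <= 0:
--         return []
--     shifts = []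
--     t = 1
--     while len(shifts) < num_shifts:
--         shifts.append(t)
--         if len(shifts) < num_shifts:
--             shifts.append(-t)
--         t += 1
--     return shifts
-- ===== SOURCE B (Python) =====
-- def compute_temporal_shifts(num_shifts: int) -> list[int]:
--     """Non-zero bidirectional shifts computed directly from output position."""
--     return [(i // 2 + 1) * (1 if i % 2 == 0 else -1) for i in range(num_shifts)]
-- ===== Notes on version B (the rewrite author's own statement) =====
-- stated objective: idiomatic
-- what changed: Replaces the while loop over magnitudes with conditional appends and length checks by a single comprehension over output positions with the closed-form value (i//2+1)*(1 if i%2==0 else -1).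
import Mathlib
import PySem

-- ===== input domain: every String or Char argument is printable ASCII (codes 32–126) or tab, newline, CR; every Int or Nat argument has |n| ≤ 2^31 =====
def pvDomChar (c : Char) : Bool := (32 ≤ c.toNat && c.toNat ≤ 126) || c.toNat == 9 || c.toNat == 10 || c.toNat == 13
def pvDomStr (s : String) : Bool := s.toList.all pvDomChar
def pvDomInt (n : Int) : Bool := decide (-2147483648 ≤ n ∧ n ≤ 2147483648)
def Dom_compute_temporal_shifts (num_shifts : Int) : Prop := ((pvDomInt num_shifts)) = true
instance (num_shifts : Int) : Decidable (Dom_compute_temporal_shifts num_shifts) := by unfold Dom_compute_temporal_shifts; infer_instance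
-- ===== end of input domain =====

-- B replaces A's while loop over magnitudes by a closed-form map over output positions (idiomatic, same cost).
-- ===== PORT A =====
-- the while loop: shifts accumulates at the end; recursion on the remaining count num_shifts - len(shifts)
def ctsLoop (num_shifts : Int) (shifts : List Int) (t : Int) : List Int :=
  if _h : shifts.length < num_shifts.toNat then
    let s1 := shifts ++ [t]
    if s1.length < num_shifts.toNat then
      ctsLoop num_shifts (s1 ++ [-t]) (t + 1)
    else
      ctsLoop num_shifts s1 (t + 1)
  else shifts
termination_by num_shifts.toNat - shifts.length
decreasing_by all_goals simp; omega

def compute_temporal_shifts (num_shifts : Int) : List Int :=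
  if num_shifts ≤ 0 then []
  else ctsLoop num_shifts [] 1

-- ===== PORT B =====
def compute_temporal_shifts_alt (num_shifts : Int) : List Int :=
  (PySem.List.pyRange 0 num_shifts 1).map
    (fun i => (PySem.Int.floordiv i 2 + 1) * (if PySem.Int.mod i 2 == 0 then 1 else -1))

-- ===== PRECONDITION & SPEC =====
def Spec_compute_temporal_shifts (num_shifts : Int) (out : List Int) : Prop := out = compute_temporal_shifts_alt num_shifts
instance (num_shifts : Int) (out : List Int) : Decidable (Spec_compute_temporal_shifts num_shifts out) := by unfold Spec_compute_temporal_shifts; infer_instance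

-- ===== CLAIM (what is proved, stated in full; the proofs are below) =====
def Claim_equal_compute_temporal_shifts : Prop := ∀ (num_shifts : Int), Dom_compute_temporal_shifts num_shifts → Spec_compute_temporal_shifts num_shifts (compute_temporal_shifts num_shifts)

-- ===== LEMMAS AND PROOFS =====

-- value of the loop's output at position j, when the loop starts with magnitude t
def ctsVal (t : Int) (j : Nat) : Int :=
  (t + (j : Int) / 2) * (if j % 2 = 0 then 1 else -1)

-- the loop appends exactly the tail described by ctsVal
theorem ctsLoop_eq (n : Nat) : ∀ (r : Nat) (s : List Int) (t : Int),
    s.length + r = n →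
    ctsLoop (n : Int) s t = s ++ (List.range r).map (ctsVal t) := by
  intro r
  induction r using Nat.strong_induction_on with
  | _ r ih =>
    intro s t hlen
    match r with
    | 0 =>
      rw [ctsLoop]
      simp_all
    | 1 =>
      rw [ctsLoop]
      have h1 : s.length < ((n : Int)).toNat := by simp; omega
      have h2 : ¬ (s ++ [t]).length < ((n : Int)).toNat := by simp; omega
      simp only [h1, dif_pos, h2, if_false]
      rw [ih 0 (by omega) (s ++ [t]) (t + 1) (by simp; omega)]
      simp [ctsVal]
    | (r' + 2) =>
      rw [ctsLoop]
      have h1 : s.length < ((n : Int)).toNat := by simp; omega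
      have h2 : (s ++ [t]).length < ((n : Int)).toNat := by simp; omega
      simp only [h1, h2, dif_pos, if_pos]
      rw [ih r' (by omega) ((s ++ [t]) ++ [-t]) (t + 1) (by simp; omega)]
      have hmap : (List.range (r' + 2)).map (ctsVal t)
          = t :: -t :: (List.range r').map (ctsVal (t + 1)) := by
        rw [List.range_succ_eq_map, List.range_succ_eq_map]
        simp only [List.map_cons, List.map_map]
        congr 1
        · simp [ctsVal]
        congr 1
        · simp [ctsVal]
        apply List.map_congr_left
        intro j _
        simp only [Function.comp]
        unfold ctsVal
        have hdiv : ((j : Int) + 1 + 1) / 2 = (j : Int) / 2 + 1 := by omega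
        have hmod : (j + 1 + 1) % 2 = j % 2 := by omega
        simp only [Nat.succ_eq_add_one]
        push_cast
        rw [hdiv, hmod]
        ring
      rw [hmap]
      simp

theorem ctsVal_eq (j : Nat) :
    ctsVal 1 j
      = (PySem.Int.floordiv (j : Int) 2 + 1) * (if PySem.Int.mod (j : Int) 2 == 0 then 1 else -1) := by
  unfold ctsVal
  have hd : PySem.Int.floordiv (j : Int) 2 = (j : Int) / 2 := by
    simp [PySem.Int.floordiv, Int.fdiv_eq_ediv]
  have hm : PySem.Int.mod (j : Int) 2 = (j : Int) % 2 := by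
    simp [PySem.Int.mod, Int.fmod_eq_emod]
  rw [hd, hm]
  by_cases h : j % 2 = 0
  · have h' : (j : Int) % 2 = 0 := by omega
    simp [h, h']
    ring
  · have h' : ¬ (j : Int) % 2 = 0 := by omega
    simp [h, h']
    ring

-- ===== VERDICT (by name: the statement is the Claim_ definition above) =====
theorem compute_temporal_shifts_spec : Claim_equal_compute_temporal_shifts := by
  intro n _
  unfold Spec_compute_temporal_shifts compute_temporal_shifts compute_temporal_shifts_alt
  by_cases h : n ≤ 0
  · simp [h]
  · simp only [h, if_false]
    have hn : ((n.toNat : Int)) = n := Int.toNat_of_nonneg (by omega)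
    rw [← hn, ctsLoop_eq n.toNat n.toNat [] 1 (by simp)]
    rw [PySem.List.pyRange_one]
    simp only [List.nil_append, List.map_map, Int.sub_zero, hn]
    apply List.map_congr_left
    intro j _
    simpa [Function.comp] using ctsVal_eq j
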